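-- pv_equiv track=rewrite | github.com/itb2/Various-Python-Assignments | Cs101/apt_fortunatenumbers/src/FortunateNumbers.py | getFortunate
-- ===== SOURCE A (Python) =====
-- def getFortunate(a,b,c):
--     set1 = set()
--     for i in range(len(a)):
--         for j in range(len(b)):
--             for k in range(len(c)):
--                 sum = a[i] + b[j] + c[k]
--                 sum = str(sum)
--                 l= 0
--                 strn = '58'
--                 for thing in sum:
--                     if thing in strn:
--                         l += 1
--                 if l == len(sum):
--                     set1.add(sum)
--     return len(set1)
-- ===== SOURCE B (Python) =====
-- def getFortunate(a, b, c):
--     if not a or not b or not c: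
--         return 0
--     ab = {x + y for x in a for y in b}
--     cset = set(c)
--     hi = max(ab) + max(cset)
--     count = 0
--     level = [5, 8]
--     for _ in range(len(str(hi))):
--         for f in level:
--             if f <= hi and any(f - ck in ab for ck in cset):
--                 count += 1
--         level = [10 * f + d for f in level for d in (5, 8)]
--     return count
-- ===== Notes on version B (the rewrite author's own statement) =====
-- stated objective: faster
-- what changed: A scans every triple a[i]+b[j]+c[k] and string-checks each sum; B precomputes the pairwise-sum set {x+y : x in a, y in b} once and instead enumerates the (at most ~2*10^d-2 for d = len(str(max sum))) candidate numbers whose decimal digits are all 5 or 8, counting a candidate f when f - ck lies in that set for some ck in set(c).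
import Mathlib
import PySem

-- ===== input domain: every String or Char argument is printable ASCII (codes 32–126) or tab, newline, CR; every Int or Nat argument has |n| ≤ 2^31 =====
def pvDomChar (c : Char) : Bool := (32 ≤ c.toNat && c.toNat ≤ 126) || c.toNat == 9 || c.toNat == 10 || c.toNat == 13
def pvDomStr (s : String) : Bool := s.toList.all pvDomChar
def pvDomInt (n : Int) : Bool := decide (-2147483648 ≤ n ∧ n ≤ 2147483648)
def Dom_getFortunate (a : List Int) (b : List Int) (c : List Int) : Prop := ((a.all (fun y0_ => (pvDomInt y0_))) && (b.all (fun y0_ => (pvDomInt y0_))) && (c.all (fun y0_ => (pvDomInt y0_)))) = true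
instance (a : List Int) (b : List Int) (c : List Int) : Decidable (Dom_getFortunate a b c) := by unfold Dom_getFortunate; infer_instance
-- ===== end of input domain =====

-- B replaces A's triple nested loop by precomputing the pairwise-sum set a+b once and
-- enumerating the candidate numbers whose digits are all 5 or 8, testing each against that set
-- (objective: faster).


set_option maxRecDepth 8192

-- ===== PORT A =====
-- literal transliteration of A: triple loop over index ranges, str(sum), count the chars of
-- the string lying in "58", add the string to a set when every char matched, return len(set).
-- indices come from range(len(..)) and are always in range, so pyGetD is exact there.
def getFortunate (a : List Int) (b : List Int) (c : List Int) : Int :=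
  let set1 : PySem.Set String := PySem.Set.empty
  let set1 :=
    (PySem.List.pyRange 0 (PySem.List.len a)).foldl (fun set1 i =>
      (PySem.List.pyRange 0 (PySem.List.len b)).foldl (fun set1 j =>
        (PySem.List.pyRange 0 (PySem.List.len c)).foldl (fun set1 k =>
          let sum : Int := PySem.List.pyGetD a i 0 + PySem.List.pyGetD b j 0 + PySem.List.pyGetD c k 0
          let sumStr : String := PySem.Int.toStr sum
          let strn : String := "58"
          let l : Int := sumStr.toList.foldl (fun l thing =>
            if PySem.Str.isIn (String.singleton thing) strn = true then l + 1 else l) 0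
          if l = PySem.Str.len sumStr then set1.add sumStr else set1) set1) set1) set1
  PySem.Set.len set1

-- ===== PORT B =====
-- literal transliteration of Source B: early 0 on an empty argument; ab = {x+y}; cset = set(c);
-- hi = max(ab)+max(cset); then len(str(hi)) rounds over a level of 5/8-digit candidates,
-- counting candidates f with f <= hi and f - ck in ab for some ck in cset, and extending
-- each candidate of the level by a final digit 5 or 8.
def getFortunate_alt (a : List Int) (b : List Int) (c : List Int) : Int :=
  if a = [] ∨ b = [] ∨ c = [] then 0
  else
    let ab : PySem.Set Int :=
      a.foldl (fun s x => b.foldl (fun s y => PySem.Set.add s (x + y)) s) PySem.Set.empty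
    let cset : PySem.Set Int := PySem.Set.ofList c
    let hi : Int := (PySem.List.max? ab (fun x => x)).getD 0
      + (PySem.List.max? cset (fun x => x)).getD 0
    -- for _ in range(len(str(hi))) with state (count, level)
    let st :=
      (List.range (PySem.Int.toChars hi).length).foldl
        (fun (st : Int × List Int) _ =>
          (st.2.foldl (fun count f =>
              if (decide (f ≤ hi) && cset.any (fun ck => PySem.Set.contains ab (f - ck))) = true
              then count + 1 else count) st.1,
           st.2.flatMap (fun f => [10 * f + 5, 10 * f + 8])))
        ((0 : Int), [5, 8])
    st.1

-- ===== PRECONDITION & SPEC =====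
def Spec_getFortunate (a : List Int) (b : List Int) (c : List Int) (out : Int) : Prop := out = getFortunate_alt a b c
instance (a : List Int) (b : List Int) (c : List Int) (out : Int) : Decidable (Spec_getFortunate a b c out) := by unfold Spec_getFortunate; infer_instance

-- ===== CLAIM (what is proved, stated in full; the proofs are below) =====
def Claim_equal_getFortunate : Prop := ∀ (a : List Int) (b : List Int) (c : List Int), Dom_getFortunate a b c → Spec_getFortunate a b c (getFortunate a b c)

-- ===== LEMMAS AND PROOFS =====

-- the list of all sums a[i]+b[j]+c[k] in A's loop order
def pvSums (a b c : List Int) : List Int :=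
  a.flatMap (fun x => b.flatMap (fun y => c.map (fun z => x + y + z)))

def pvIs58Char (ch : Char) : Bool := ch == '5' || ch == '8'

def pvIs58 (s : Int) : Bool := (PySem.Int.toChars s).all pvIs58Char

-- the body of A's innermost loop, applied to the sum
def pvBody (s : PySem.Set String) (sum : Int) : PySem.Set String :=
  let sumStr : String := PySem.Int.toStr sum
  let strn : String := "58"
  let l : Int := sumStr.toList.foldl (fun l thing =>
    if PySem.Str.isIn (String.singleton thing) strn = true then l + 1 else l) 0
  if l = PySem.Str.len sumStr then s.add sumStr else s

def pvG (s : PySem.Set String) (v : Int) : PySem.Set String :=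
  if pvIs58 v = true then s.add (PySem.Int.toStr v) else s

def pvOUT (b c : List Int) (s : PySem.Set String) (v : Int) : PySem.Set String :=
  List.foldl (fun s j =>
    List.foldl (fun s k => pvBody s (v + PySem.List.pyGetD b j 0 + PySem.List.pyGetD c k 0)) s
      (PySem.List.pyRange 0 (PySem.List.len c))) s
    (PySem.List.pyRange 0 (PySem.List.len b))

-- B-side abbreviations
def pvAB (a b : List Int) : PySem.Set Int :=
  a.foldl (fun s x => b.foldl (fun s y => PySem.Set.add s (x + y)) s) PySem.Set.empty

def pvHi (a b c : List Int) : Int :=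
  (PySem.List.max? (pvAB a b) (fun x => x)).getD 0
    + (PySem.List.max? (PySem.Set.ofList c) (fun x => x)).getD 0

def pvCandStep (l : List Int) : List Int := l.flatMap (fun f => [10 * f + 5, 10 * f + 8])

def pvCandList : Nat → List Int
  | 0 => [5, 8]
  | n + 1 => pvCandStep (pvCandList n)

def pvFlat (d : Nat) : List Int := (List.range d).flatMap pvCandList

-- ### Nat.toDigits toolkit

theorem pvTdcAcc (f : Nat) : ∀ (n : Nat) (acc : List Char),
    Nat.toDigitsCore 10 f n acc = Nat.toDigitsCore 10 f n [] ++ acc := by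
  induction f with
  | zero => intro n acc; simp [Nat.toDigitsCore]
  | succ f ih =>
    intro n acc
    simp only [Nat.toDigitsCore]
    by_cases h : n / 10 = 0
    · simp [h]
    · simp only [h, if_false]
      rw [ih (n / 10) ((n % 10).digitChar :: acc), ih (n / 10) [(n % 10).digitChar]]
      simp

theorem pvTdcFuel (n : Nat) : ∀ (f f' : Nat), n < f → n < f' →
    Nat.toDigitsCore 10 f n [] = Nat.toDigitsCore 10 f' n [] := by
  induction n using Nat.strong_induction_on with
  | _ n ih =>
    intro f f' hf hf'
    cases f with
    | zero => omega
    | succ f =>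
      cases f' with
      | zero => omega
      | succ f' =>
        simp only [Nat.toDigitsCore]
        by_cases h : n / 10 = 0
        · simp [h]
        · simp only [h, if_false]
          rw [pvTdcAcc f (n / 10), pvTdcAcc f' (n / 10)]
          have hlt : n / 10 < n := Nat.div_lt_self (by omega) (by omega)
          rw [ih (n / 10) hlt f f' (by omega) (by omega)]

theorem pvToDigits_lt10 (n : Nat) (h : n < 10) : Nat.toDigits 10 n = [Nat.digitChar n] := by
  have h1 : n / 10 = 0 := Nat.div_eq_of_lt h
  have h2 : n % 10 = n := Nat.mod_eq_of_lt h
  simp [Nat.toDigits, Nat.toDigitsCore, h1, h2]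

theorem pvToDigits_ge10 (n : Nat) (h : 10 ≤ n) :
    Nat.toDigits 10 n = Nat.toDigits 10 (n / 10) ++ [Nat.digitChar (n % 10)] := by
  have h0 : n / 10 ≠ 0 := by
    intro h'; have := Nat.div_eq_of_lt (show n < 10 by omega); omega
  show Nat.toDigitsCore 10 (n + 1) n [] = _
  simp only [Nat.toDigitsCore, h0, if_false]
  rw [pvTdcAcc n (n / 10)]
  have hlt : n / 10 < n := Nat.div_lt_self (by omega) (by omega)
  rw [pvTdcFuel (n / 10) n (n / 10 + 1) hlt (by omega)]
  rfl

theorem pvToDigits_ne_nil (n : Nat) : Nat.toDigits 10 n ≠ [] := by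
  by_cases h : n < 10
  · rw [pvToDigits_lt10 n h]; simp
  · rw [pvToDigits_ge10 n (by omega)]; simp

theorem pvToDigits_len_mono (n : Nat) : ∀ m : Nat, m ≤ n →
    (Nat.toDigits 10 m).length ≤ (Nat.toDigits 10 n).length := by
  induction n using Nat.strong_induction_on with
  | _ n ih =>
    intro m hmn
    by_cases hn : n < 10
    · rw [pvToDigits_lt10 n hn, pvToDigits_lt10 m (by omega)]
      simp
    · by_cases hm : m < 10
      · rw [pvToDigits_lt10 m hm, pvToDigits_ge10 n (by omega)]
        simp
      · rw [pvToDigits_ge10 n (by omega), pvToDigits_ge10 m (by omega)]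
        simp only [List.length_append, List.length_cons, List.length_nil]
        have hlt : n / 10 < n := Nat.div_lt_self (by omega) (by omega)
        have := ih (n / 10) hlt (m / 10) (Nat.div_le_div_right hmn)
        omega

theorem pvDigitChar_inj (m k : Nat) (hm : m < 10) (hk : k < 10)
    (h : Nat.digitChar m = Nat.digitChar k) : m = k := by
  interval_cases m <;> interval_cases k <;> first | rfl | exact absurd h (by decide)

theorem pvToDigits_inj (n : Nat) : ∀ m : Nat, Nat.toDigits 10 m = Nat.toDigits 10 n → m = n := by
  induction n using Nat.strong_induction_on with
  | _ n ih =>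
    intro m h
    by_cases hn : n < 10
    · by_cases hm : m < 10
      · rw [pvToDigits_lt10 n hn, pvToDigits_lt10 m hm] at h
        exact pvDigitChar_inj m n hm hn (by simpa using h)
      · rw [pvToDigits_lt10 n hn, pvToDigits_ge10 m (by omega)] at h
        have hpos : 0 < (Nat.toDigits 10 (m / 10)).length :=
          List.length_pos_iff.mpr (pvToDigits_ne_nil _)
        have hl := congrArg List.length h
        simp only [List.length_append, List.length_cons, List.length_nil] at hl
        omega
    · by_cases hm : m < 10
      · rw [pvToDigits_lt10 m hm, pvToDigits_ge10 n (by omega)] at h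
        have hpos : 0 < (Nat.toDigits 10 (n / 10)).length :=
          List.length_pos_iff.mpr (pvToDigits_ne_nil _)
        have hl := congrArg List.length h
        simp only [List.length_append, List.length_cons, List.length_nil] at hl
        omega
      · rw [pvToDigits_ge10 n (by omega), pvToDigits_ge10 m (by omega)] at h
        have hlen : (Nat.toDigits 10 (m / 10)).length = (Nat.toDigits 10 (n / 10)).length := by
          have hl := congrArg List.length h
          simp only [List.length_append, List.length_cons, List.length_nil] at hl
          omega
        obtain ⟨hpre, hdig⟩ := List.append_inj h hlen
        have hd : m % 10 = n % 10 :=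
          pvDigitChar_inj _ _ (Nat.mod_lt _ (by omega)) (Nat.mod_lt _ (by omega))
            (by simpa using hdig)
        have hlt : n / 10 < n := Nat.div_lt_self (by omega) (by omega)
        have hq : m / 10 = n / 10 := ih (n / 10) hlt (m / 10) hpre
        omega

-- ### toChars facts

theorem pvToChars_pos (s : Int) (h : 0 < s) :
    PySem.Int.toChars s = Nat.toDigits 10 s.toNat := by
  simp only [PySem.Int.toChars, if_neg (not_lt.mpr (le_of_lt h))]

theorem pvIs58_pos (s : Int) (h : pvIs58 s = true) : 0 < s := by
  rcases lt_trichotomy s 0 with hneg | hz | hpos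
  · exfalso
    have hch : PySem.Int.toChars s = '-' :: Nat.toDigits 10 s.natAbs := by
      simp only [PySem.Int.toChars, if_pos hneg]
    rw [pvIs58, hch] at h
    simp only [List.all_cons, Bool.and_eq_true] at h
    exact absurd h.1 (by decide)
  · subst hz; exact absurd h (by decide)
  · exact hpos

-- ### candidate list facts

theorem pvMem_candStep (l : List Int) (x : Int) :
    x ∈ pvCandStep l ↔ ∃ f ∈ l, x = 10 * f + 5 ∨ x = 10 * f + 8 := by
  simp only [pvCandStep, List.mem_flatMap, List.mem_cons,
    List.not_mem_nil, or_false]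

theorem pvCand_bounds (n : Nat) : ∀ x ∈ pvCandList n, 5 * 10 ^ n ≤ x ∧ x < 10 ^ (n + 1) := by
  induction n with
  | zero => intro x hx; fin_cases hx <;> norm_num
  | succ n ih =>
    intro x hx
    rw [pvCandList, pvMem_candStep] at hx
    obtain ⟨f, hf, hx⟩ := hx
    obtain ⟨h1, h2⟩ := ih f hf
    have hp : (10 : Int) ^ (n + 1) = 10 * 10 ^ n := by ring
    have hp2 : (10 : Int) ^ (n + 2) = 10 * 10 ^ (n + 1) := by ring
    rcases hx with rfl | rfl <;> constructor <;> omega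

theorem pvCand_chars (n : Nat) : ∀ x ∈ pvCandList n,
    (PySem.Int.toChars x).all pvIs58Char = true ∧ (PySem.Int.toChars x).length = n + 1 := by
  induction n with
  | zero => intro x hx; fin_cases hx <;> exact ⟨by decide, by decide⟩
  | succ n ih =>
    intro x hx
    rw [pvCandList, pvMem_candStep] at hx
    obtain ⟨f, hf, hx⟩ := hx
    obtain ⟨hall, hlen⟩ := ih f hf
    obtain ⟨hlo, hhi⟩ := pvCand_bounds n f hf
    have hfpos : 0 < f := lt_of_lt_of_le (by positivity) hlo
    have hxpos : 0 < x := by rcases hx with rfl | rfl <;> omega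
    have hx10 : 10 ≤ x.toNat := by rcases hx with rfl | rfl <;> omega
    have hdivmod : x.toNat / 10 = f.toNat ∧ (x.toNat % 10 = 5 ∨ x.toNat % 10 = 8) := by
      rcases hx with rfl | rfl <;> constructor <;> omega
    have hkey : PySem.Int.toChars x
        = PySem.Int.toChars f ++ [Nat.digitChar (x.toNat % 10)] := by
      rw [pvToChars_pos x hxpos, pvToChars_pos f hfpos,
        pvToDigits_ge10 x.toNat hx10, hdivmod.1]
    have hdchar : pvIs58Char (Nat.digitChar (x.toNat % 10)) = true := by
      rcases hdivmod.2 with h | h <;> rw [h] <;> decide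
    constructor
    · rw [hkey]; simp [List.all_append, hall, hdchar]
    · rw [hkey]; simp [hlen]

theorem pvCand_complete (k : Nat) : ∀ s : Int, 0 < s → s.toNat ≤ k →
    (PySem.Int.toChars s).all pvIs58Char = true →
    s ∈ pvCandList ((PySem.Int.toChars s).length - 1) := by
  induction k with
  | zero => intro s hs hk; omega
  | succ k ih =>
    intro s hs hk hall
    by_cases h10 : s < 10
    · have hchars : PySem.Int.toChars s = [Nat.digitChar s.toNat] := by
        rw [pvToChars_pos s hs, pvToDigits_lt10 s.toNat (by omega)]
      rw [hchars] at hall ⊢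
      have hlt : s.toNat < 10 := by omega
      simp only [List.all_cons, Bool.and_true, List.all_nil, pvIs58Char,
        Bool.or_eq_true, beq_iff_eq] at hall
      have h58 : s.toNat = 5 ∨ s.toNat = 8 := by
        rcases hall with h | h
        · exact Or.inl (pvDigitChar_inj _ _ hlt (by norm_num) (by rw [h]; rfl))
        · exact Or.inr (pvDigitChar_inj _ _ hlt (by norm_num) (by rw [h]; rfl))
      simp only [List.length_cons, List.length_nil]
      have : s = 5 ∨ s = 8 := by omega
      rcases this with rfl | rfl <;> simp [pvCandList]
    · -- s ≥ 10
      set s' : Int := ((s.toNat / 10 : Nat) : Int) with hs'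
      have hs'pos : 0 < s' := by simp only [hs']; omega
      have hkey : PySem.Int.toChars s
          = PySem.Int.toChars s' ++ [Nat.digitChar (s.toNat % 10)] := by
        rw [pvToChars_pos s hs, pvToChars_pos s' hs'pos, pvToDigits_ge10 s.toNat (by omega)]
        congr 2
      rw [hkey, List.all_append, Bool.and_eq_true] at hall
      obtain ⟨hall', hdigs⟩ := hall
      have hdig : pvIs58Char (Nat.digitChar (s.toNat % 10)) = true := by simpa using hdigs
      have hmod : s.toNat % 10 = 5 ∨ s.toNat % 10 = 8 := by
        simp only [pvIs58Char, Bool.or_eq_true, beq_iff_eq] at hdig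
        rcases hdig with h | h
        · exact Or.inl (pvDigitChar_inj _ _ (Nat.mod_lt _ (by omega)) (by norm_num)
            (by rw [h]; rfl))
        · exact Or.inr (pvDigitChar_inj _ _ (Nat.mod_lt _ (by omega)) (by norm_num)
            (by rw [h]; rfl))
      have hih := ih s' hs'pos (by simp only [hs']; omega) hall'
      have hne : PySem.Int.toChars s' ≠ [] := by
        rw [pvToChars_pos s' hs'pos]; exact pvToDigits_ne_nil _
      have hlen1 : 1 ≤ (PySem.Int.toChars s').length := List.length_pos_iff.mpr hne
      have hstep : s ∈ pvCandStep (pvCandList ((PySem.Int.toChars s').length - 1)) := by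
        rw [pvMem_candStep]
        refine ⟨s', hih, ?_⟩
        rcases hmod with h | h
        · exact Or.inl (by simp only [hs']; omega)
        · exact Or.inr (by simp only [hs']; omega)
      have hlens : (PySem.Int.toChars s).length = (PySem.Int.toChars s').length + 1 := by
        rw [hkey]; simp
      have harith : (PySem.Int.toChars s).length - 1
          = ((PySem.Int.toChars s').length - 1) + 1 := by omega
      rw [harith, pvCandList]
      exact hstep

theorem pvCandStep_pairwise (l : List Int) (hpos : ∀ x ∈ l, 0 < x)
    (h : l.Pairwise (· < ·)) : (pvCandStep l).Pairwise (· < ·) := by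
  induction l with
  | nil => simp [pvCandStep]
  | cons f l ih =>
    have hrest : (pvCandStep l).Pairwise (· < ·) :=
      ih (fun x hx => hpos x (List.mem_cons_of_mem f hx)) (List.Pairwise.sublist (by simp) h)
    have hflt : ∀ g ∈ l, f < g := fun g hg => (List.pairwise_cons.mp h).1 g hg
    show ((10 * f + 5) :: (10 * f + 8) :: pvCandStep l).Pairwise (· < ·)
    refine List.Pairwise.cons ?_ (List.Pairwise.cons ?_ hrest)
    · -- head 10*f+5 against everything after it
      intro y hy
      rcases List.mem_cons.mp hy with rfl | hy
      · omega
      · rw [pvMem_candStep] at hy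
        obtain ⟨g, hg, hy⟩ := hy
        have := hflt g hg
        rcases hy with rfl | rfl <;> omega
    · -- 10*f+8 against the rest
      intro y hy
      rw [pvMem_candStep] at hy
      obtain ⟨g, hg, hy⟩ := hy
      have := hflt g hg
      rcases hy with rfl | rfl <;> omega

theorem pvCand_pairwise (n : Nat) : (pvCandList n).Pairwise (· < ·) := by
  induction n with
  | zero => simp [pvCandList]
  | succ n ih =>
    exact pvCandStep_pairwise _ (fun x hx => by
      have h1 := (pvCand_bounds n x hx).1
      have h2 : (0:Int) < 5 * 10 ^ n := by positivity
      omega) ih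

theorem pvMem_flat (d : Nat) (x : Int) : x ∈ pvFlat d ↔ ∃ k < d, x ∈ pvCandList k := by
  simp only [pvFlat, List.mem_flatMap, List.mem_range]

theorem pvFlat_pairwise (d : Nat) : (pvFlat d).Pairwise (· < ·) := by
  induction d with
  | zero => simp [pvFlat]
  | succ d ih =>
    have hsplit : pvFlat (d + 1) = pvFlat d ++ pvCandList d := by
      simp [pvFlat, List.range_succ, List.flatMap_append]
    rw [hsplit, List.pairwise_append]
    refine ⟨ih, pvCand_pairwise d, ?_⟩
    intro x hx y hy
    rw [pvMem_flat] at hx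
    obtain ⟨k, hk, hx⟩ := hx
    have hxu : x < 10 ^ (k + 1) := (pvCand_bounds k x hx).2
    have hyl : 5 * 10 ^ d ≤ y := (pvCand_bounds d y hy).1
    have hpow : (10:Int) ^ (k + 1) ≤ 10 ^ d := pow_le_pow_right₀ (by norm_num) (by omega)
    have hpow2 : (0:Int) < 10 ^ d := by positivity
    omega

theorem pvFlat_nodup (d : Nat) : (pvFlat d).Nodup :=
  (pvFlat_pairwise d).imp (fun h => ne_of_lt h)

-- ### A-side reduction

theorem pvMem_sums (a b c : List Int) (s : Int) :
    s ∈ pvSums a b c ↔ ∃ x ∈ a, ∃ y ∈ b, ∃ z ∈ c, s = x + y + z := by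
  simp [pvSums, List.mem_flatMap, List.mem_map, eq_comm]

theorem pvRangeElim {β : Type} (xs : List Int) (F : β → Int → β) (s0 : β) :
    List.foldl (fun s i => F s (PySem.List.pyGetD xs i 0)) s0
      (PySem.List.pyRange 0 (PySem.List.len xs)) = List.foldl F s0 xs := by
  simpa using PySem.List.foldl_pyRange_pyGetD xs 0 F s0 le_rfl

theorem pvCond58 (sumStr : String) :
    (sumStr.toList.foldl (fun l thing =>
        if PySem.Str.isIn (String.singleton thing) "58" = true then l + 1 else l) (0:Int))
      = PySem.Str.len sumStr
    ↔ sumStr.toList.all pvIs58Char = true := by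
  rw [PySem.List.foldl_count_if (fun thing => PySem.Str.isIn (String.singleton thing) "58")
    sumStr.toList 0]
  rw [PySem.Str.len_eq]
  have hiff2 : ∀ th : Char, (pvIs58Char th = true) ↔ th ∈ ['5', '8'] := by
    intro th
    simp [pvIs58Char]
  have hp : ∀ th : Char, PySem.Str.isIn (String.singleton th) "58" = pvIs58Char th := by
    intro th
    have hiff : PySem.Str.isIn (String.singleton th) "58" = true ↔ th ∈ ['5', '8'] := by
      rw [PySem.Str.isIn_iff_infix]
      have h1 : (String.singleton th).toList = [th] := by simp
      have h2 : ("58" : String).toList = ['5', '8'] := by decide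
      rw [h1, h2, List.singleton_infix_iff]
    by_cases hmem : th ∈ ['5', '8']
    · rw [hiff.mpr hmem, (hiff2 th).mpr hmem]
    · have e1 : PySem.Str.isIn (String.singleton th) "58" = false := by
        rw [← Bool.not_eq_true]; exact fun hc => hmem (hiff.mp hc)
      have e2 : pvIs58Char th = false := by
        rw [← Bool.not_eq_true]; exact fun hc => hmem ((hiff2 th).mp hc)
      rw [e1, e2]
    
  simp only [hp]
  rw [List.all_eq_true, ← List.countP_eq_length]
  rw [show (fun thing => pvIs58Char thing) = pvIs58Char from rfl]
  constructor <;> intro h <;> omega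

theorem pvBody_eq_pvG (s : PySem.Set String) (v : Int) : pvBody s v = pvG s v := by
  unfold pvBody pvG
  refine if_congr ?_ rfl rfl
  rw [pvCond58, PySem.Int.toList_toStr]
  exact Iff.rfl

theorem pvFoldAddFilter (l : List Int) : ∀ s : PySem.Set String,
    l.foldl pvG s = s.update ((l.filter pvIs58).map PySem.Int.toStr) := by
  induction l with
  | nil => intro s; simp [PySem.Set.update]
  | cons x l ih =>
    intro s
    by_cases h : pvIs58 x = true
    · simp only [List.foldl_cons, List.filter_cons, h, if_true, List.map_cons]
      rw [show pvG s x = s.add (PySem.Int.toStr x) from by simp [pvG, h]]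
      rw [ih]
      simp [PySem.Set.update]
    · simp only [List.foldl_cons, List.filter_cons, h]
      rw [show pvG s x = s from by simp [pvG, h]]
      rw [ih]
      simp

theorem pvTripleFlat (a b c : List Int) (s0 : PySem.Set String) :
    List.foldl (fun s x => List.foldl (fun s y =>
        List.foldl (fun s z => pvG s (x + y + z)) s c) s b) s0 a
      = List.foldl pvG s0 (pvSums a b c) := by
  simp only [pvSums, List.foldl_flatMap, List.foldl_map]

theorem pvLenOfList (L : List String) :
    PySem.Set.len (PySem.Set.ofList L) = (L.toFinset.card : Int) := by
  have h1 : (PySem.Set.ofList L).toFinset = L.toFinset := by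
    ext x; simp [List.mem_toFinset, PySem.Set.mem_ofList]
  have h2 := List.toFinset_card_of_nodup (PySem.Set.nodup_ofList L)
  show ((PySem.Set.ofList L).length : Int) = (L.toFinset.card : Int)
  rw [← h1, h2]

theorem pvA_eq (a b c : List Int) :
    getFortunate a b c
      = ((((pvSums a b c).filter pvIs58).map PySem.Int.toStr).toFinset.card : Int) := by
  have e1 : getFortunate a b c
      = PySem.Set.len (List.foldl (pvOUT b c) PySem.Set.empty a) :=
    congrArg PySem.Set.len (pvRangeElim a (pvOUT b c) PySem.Set.empty)
  have e2 : ∀ (s : PySem.Set String) (v : Int), pvOUT b c s v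
      = List.foldl (fun s y => List.foldl (fun s z => pvBody s (v + y + z)) s c) s b := by
    intro s v
    have houter := pvRangeElim b
      (fun s w => List.foldl (fun s k =>
        pvBody s (v + w + PySem.List.pyGetD c k 0)) s (PySem.List.pyRange 0 (PySem.List.len c))) s
    refine houter.trans ?_
    have hFG : (fun (s : PySem.Set String) w => List.foldl (fun s k =>
          pvBody s (v + w + PySem.List.pyGetD c k 0)) s (PySem.List.pyRange 0 (PySem.List.len c)))
        = fun (s : PySem.Set String) y => List.foldl (fun s z => pvBody s (v + y + z)) s c :=
      funext fun s => funext fun y => pvRangeElim c (fun s u => pvBody s (v + y + u)) s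
    rw [hFG]
  have e3 : List.foldl (pvOUT b c) PySem.Set.empty a
      = List.foldl (fun s x => List.foldl (fun s y =>
          List.foldl (fun s z => pvG s (x + y + z)) s c) s b) PySem.Set.empty a := by
    have hfun : pvOUT b c = fun s x => List.foldl (fun s y =>
        List.foldl (fun s z => pvG s (x + y + z)) s c) s b := by
      funext s v
      rw [e2 s v]
      simp only [pvBody_eq_pvG]
    rw [hfun]
  rw [e1, e3, pvTripleFlat, pvFoldAddFilter]
  have hupd : (PySem.Set.empty : PySem.Set String).update
      (((pvSums a b c).filter pvIs58).map PySem.Int.toStr)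
      = PySem.Set.ofList (((pvSums a b c).filter pvIs58).map PySem.Int.toStr) := by
    rw [PySem.Set.ofList_eq_foldl]; rfl
  rw [hupd, pvLenOfList]

-- ### B-side reduction

theorem pvMem_AB (a b : List Int) (x : Int) :
    x ∈ pvAB a b ↔ ∃ p ∈ a, ∃ q ∈ b, x = p + q := by
  have hof : pvAB a b = PySem.Set.ofList (a.flatMap (fun p => b.map (fun q => p + q))) := by
    rw [PySem.Set.ofList_eq_foldl]
    simp only [List.foldl_flatMap, List.foldl_map]
    rfl
  rw [hof, PySem.Set.mem_ofList]
  simp [List.mem_flatMap, List.mem_map, eq_comm]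

theorem pvMax?_getD_isMax (xs : List Int) (hne : xs ≠ []) :
    ∀ y ∈ xs, y ≤ (PySem.List.max? xs (fun x => x)).getD 0 := by
  intro y hy
  cases h : PySem.List.max? xs (fun x => x) with
  | none => exact absurd ((PySem.List.max?_eq_none_iff xs _).mp h) hne
  | some m => simpa using PySem.List.max?_isMax h y hy

theorem pvHi_bound (a b c : List Int) :
    ∀ s ∈ pvSums a b c, s ≤ pvHi a b c := by
  intro s hs
  rw [pvMem_sums] at hs
  obtain ⟨x, hx, y, hy, z, hz, rfl⟩ := hs
  have hxyAB : x + y ∈ pvAB a b := (pvMem_AB a b (x + y)).mpr ⟨x, hx, y, hy, rfl⟩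
  have habne : pvAB a b ≠ [] := fun h => by rw [h] at hxyAB; exact List.not_mem_nil hxyAB
  have hcne : PySem.Set.ofList c ≠ [] := by
    intro h
    have : z ∈ PySem.Set.ofList c := (PySem.Set.mem_ofList c z).mpr hz
    rw [h] at this; exact List.not_mem_nil this
  have h1 := pvMax?_getD_isMax (pvAB a b) habne (x + y) hxyAB
  have h2 := pvMax?_getD_isMax (PySem.Set.ofList c) hcne z ((PySem.Set.mem_ofList c z).mpr hz)
  unfold pvHi
  omega

theorem pvLoopInv (p : Int → Bool) (d : Nat) :
    (List.range d).foldl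
      (fun (st : Int × List Int) _ =>
        (st.2.foldl (fun count f => if p f = true then count + 1 else count) st.1,
         st.2.flatMap (fun f => [10 * f + 5, 10 * f + 8])))
      ((0 : Int), [5, 8])
    = ((((pvFlat d).countP p : Nat) : Int), pvCandList d) := by
  induction d with
  | zero => simp [pvFlat, pvCandList]
  | succ d ih =>
    rw [List.range_succ, List.foldl_append, ih]
    simp only [List.foldl_cons, List.foldl_nil]
    have hflat : pvFlat (d + 1) = pvFlat d ++ pvCandList d := by
      simp [pvFlat, List.range_succ, List.flatMap_append]
    rw [hflat, List.countP_append]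
    refine Prod.ext ?_ rfl
    show (pvCandList d).foldl (fun count f => if p f = true then count + 1 else count)
        (((pvFlat d).countP p : Nat) : Int) = _
    rw [PySem.List.foldl_count_if p (pvCandList d)]
    push_cast
    ring

theorem pvB_eq (a b c : List Int) (ha : a ≠ []) (hb : b ≠ []) (hc : c ≠ []) :
    getFortunate_alt a b c
      = (((pvFlat (PySem.Int.toChars (pvHi a b c)).length).countP
          (fun f => decide (f ≤ pvHi a b c) && decide (f ∈ pvSums a b c)) : Nat) : Int) := by
  have hcond : ¬ (a = [] ∨ b = [] ∨ c = []) := by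
    rintro (h | h | h)
    exacts [ha h, hb h, hc h]
  have e0 : getFortunate_alt a b c
      = ((List.range (PySem.Int.toChars (pvHi a b c)).length).foldl
          (fun (st : Int × List Int) _ =>
            (st.2.foldl (fun count f =>
                if (decide (f ≤ pvHi a b c) && (PySem.Set.ofList c).any
                    (fun ck => PySem.Set.contains (pvAB a b) (f - ck))) = true
                then count + 1 else count) st.1,
             st.2.flatMap (fun f => [10 * f + 5, 10 * f + 8])))
          ((0 : Int), [5, 8])).1 := by
    unfold getFortunate_alt
    rw [if_neg hcond]
    rfl
  rw [e0]
  have hloop := pvLoopInv (fun f => decide (f ≤ pvHi a b c) && (PySem.Set.ofList c).any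
    (fun ck => PySem.Set.contains (pvAB a b) (f - ck))) (PySem.Int.toChars (pvHi a b c)).length
  rw [hloop]
  show (((pvFlat _).countP _ : Nat) : Int) = _
  congr 1
  apply List.countP_congr
  intro f _
  simp only [Bool.and_eq_true, decide_eq_true_eq, List.any_eq_true]
  constructor
  · rintro ⟨hle, ck, hck, hcont⟩
    refine ⟨hle, ?_⟩
    rw [PySem.Set.contains_iff, pvMem_AB] at hcont
    obtain ⟨p, hp, q, hq, hpq⟩ := hcont
    rw [pvMem_sums]
    exact ⟨p, hp, q, hq, ck, (PySem.Set.mem_ofList c ck).mp hck, by omega⟩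
  · rintro ⟨hle, hmem⟩
    refine ⟨hle, ?_⟩
    rw [pvMem_sums] at hmem
    obtain ⟨x, hx, y, hy, z, hz, rfl⟩ := hmem
    refine ⟨z, (PySem.Set.mem_ofList c z).mpr hz, ?_⟩
    rw [PySem.Set.contains_iff, pvMem_AB]
    exact ⟨x, hx, y, hy, by omega⟩

-- ### final assembly

theorem pvToStr_inj (s t : Int) (hs : 0 < s) (ht : 0 < t)
    (h : PySem.Int.toStr s = PySem.Int.toStr t) : s = t := by
  have hchars : PySem.Int.toChars s = PySem.Int.toChars t := by
    have := congrArg String.toList h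
    simpa [PySem.Int.toList_toStr] using this
  rw [pvToChars_pos s hs, pvToChars_pos t ht] at hchars
  have := pvToDigits_inj t.toNat s.toNat hchars
  omega

theorem pvToFinsetMap (L : List Int) (f : Int → String) :
    (L.map f).toFinset = L.toFinset.image f := by
  ext x; simp

theorem pvSums_nil (a b c : List Int) (h : a = [] ∨ b = [] ∨ c = []) :
    pvSums a b c = [] := by
  rcases h with rfl | rfl | rfl <;> simp [pvSums]

theorem pvMain (a b c : List Int) : getFortunate a b c = getFortunate_alt a b c := by
  by_cases hempty : a = [] ∨ b = [] ∨ c = []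
  · rw [pvA_eq, pvSums_nil a b c hempty]
    unfold getFortunate_alt
    rw [if_pos hempty]
    simp
  · rw [not_or, not_or] at hempty
    obtain ⟨ha, hb, hc⟩ := hempty
    rw [pvA_eq, pvB_eq a b c ha hb hc]
    set hi := pvHi a b c with hhi
    set d := (PySem.Int.toChars hi).length with hd
    set q : Int → Bool := fun f => decide (f ≤ hi) && decide (f ∈ pvSums a b c) with hq
    rw [pvToFinsetMap]
    have hinj : Set.InjOn PySem.Int.toStr ↑((pvSums a b c).filter pvIs58).toFinset := by
      intro s hsmem t htmem hst
      simp only [Finset.mem_coe, List.mem_toFinset, List.mem_filter]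
        at hsmem htmem
      exact pvToStr_inj s t (pvIs58_pos s hsmem.2) (pvIs58_pos t htmem.2) hst
    rw [Finset.card_image_of_injOn hinj]
    rw [List.countP_eq_length_filter]
    rw [← List.toFinset_card_of_nodup (List.Nodup.filter q (pvFlat_nodup d))]
    have hset : ((pvSums a b c).filter pvIs58).toFinset = ((pvFlat d).filter q).toFinset := by
      ext x
      simp only [List.mem_toFinset, List.mem_filter, hq, Bool.and_eq_true, decide_eq_true_eq]
      constructor
      · rintro ⟨hs, h58⟩
        have hpos := pvIs58_pos x h58
        have hle : x ≤ hi := pvHi_bound a b c x hs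
        have hipos : 0 < hi := lt_of_lt_of_le hpos hle
        have hcand := pvCand_complete x.toNat x hpos le_rfl (by simpa [pvIs58] using h58)
        have hxne : PySem.Int.toChars x ≠ [] := by
          rw [pvToChars_pos x hpos]; exact pvToDigits_ne_nil _
        have hlen1 : 1 ≤ (PySem.Int.toChars x).length := List.length_pos_iff.mpr hxne
        have hlen : (PySem.Int.toChars x).length ≤ d := by
          rw [hd, pvToChars_pos x hpos, pvToChars_pos hi hipos]
          exact pvToDigits_len_mono hi.toNat x.toNat (by omega)
        exact ⟨(pvMem_flat d x).mpr ⟨(PySem.Int.toChars x).length - 1, by omega, hcand⟩,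
          hle, hs⟩
      · rintro ⟨hflat, hle, hs⟩
        refine ⟨hs, ?_⟩
        obtain ⟨k, hk, hmem⟩ := (pvMem_flat d x).mp hflat
        exact (pvCand_chars k x hmem).1
    rw [hset]

-- ===== VERDICT (by name: the statement is the Claim_ definition above) =====
theorem getFortunate_spec : Claim_equal_getFortunate := by
  intro a b c _
  show getFortunate a b c = getFortunate_alt a b c
  exact pvMain a b c
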